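-- pv_equiv track=rewrite | github.com/SpaceDust2/ElectroHackAIAgents | data.py | sort_dataset_by_city
-- ===== SOURCE A (Python) =====
-- def extract_city(address):
--     # Получаем подстроку между первой и второй запятой
--     parts = address.split(',')
--     if len(parts) > 1:
--         return parts[1].strip()
--     return "Unknown"
--
-- def sort_dataset_by_city(dataset):
--     city_dict = {}
--     for item in dataset:
--         address = item.get('address', '')
--         city = extract_city(address)
--         if city not in city_dict:
--             city_dict[city] = []
--         city_dict[city].append(item)
--     return city_dict
-- ===== SOURCE B (Python) =====
-- def extract_city(address):
--     parts = address.split(',')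
--     if len(parts) > 1:
--         return parts[1].strip()
--     return "Unknown"
--
-- def sort_dataset_by_city(dataset):
--     # Two-pass strategy: compute each item's city once, collect the distinct
--     # cities in first-occurrence order, then build each group by filtering.
--     cities = [extract_city(item.get('address', '')) for item in dataset]
--     seen = []
--     for c in cities:
--         if c not in seen:
--             seen.append(c)
--     return {c: [item for item, cc in zip(dataset, cities) if cc == c]
--             for c in seen}
-- ===== Notes on version B (the rewrite author's own statement) =====
-- stated objective: alternative
-- what changed: Replaced the single-pass dict accumulation (create-empty-then-append per item) by a two-pass scheme: precompute each item's city, dedup cities in first-occurrence order, then build each group with one filter per distinct city.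
import Mathlib
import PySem

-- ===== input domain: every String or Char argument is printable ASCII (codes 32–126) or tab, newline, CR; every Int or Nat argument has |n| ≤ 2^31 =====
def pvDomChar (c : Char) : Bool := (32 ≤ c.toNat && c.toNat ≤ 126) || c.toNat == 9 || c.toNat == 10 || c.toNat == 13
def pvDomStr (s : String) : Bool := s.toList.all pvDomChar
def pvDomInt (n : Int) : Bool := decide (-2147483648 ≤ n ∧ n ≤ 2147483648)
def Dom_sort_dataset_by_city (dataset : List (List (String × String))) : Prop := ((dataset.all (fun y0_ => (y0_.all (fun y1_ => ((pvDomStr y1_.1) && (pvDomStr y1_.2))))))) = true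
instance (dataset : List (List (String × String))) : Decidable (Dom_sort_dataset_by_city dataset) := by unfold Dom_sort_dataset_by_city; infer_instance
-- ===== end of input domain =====

-- B replaces A's single-pass dict accumulation by a two-pass scheme (dedup the
-- cities, then one filter per distinct city); same result, objective: alternative.

-- ===== PORT A =====
-- helper shared by both Pythons (Source B defines the identical extract_city)
def extract_city (address : String) : String :=
  let parts := (PySem.Str.split? address ",").getD []
  if parts.length > 1 then PySem.Str.strip ((PySem.List.pyGet? parts 1).getD "") else "Unknown"

def sort_dataset_by_city (dataset : List (List (String × String))) : List (String × List (List (String × String))) :=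
  (dataset.foldl (fun city_dict item =>
      let address := (PySem.Dict.mk item).getD "address" ""
      let city := extract_city address
      let d1 := if city_dict.contains city then city_dict else city_dict.insert city []
      d1.modify city [] (fun l => l ++ [item]))
    PySem.Dict.empty).items

-- ===== PORT B =====
def sort_dataset_by_city_alt (dataset : List (List (String × String))) : List (String × List (List (String × String))) :=
  let cities := dataset.map (fun item => extract_city ((PySem.Dict.mk item).getD "address" ""))
  let seen : PySem.Set String := cities.foldl (fun s c => if c ∈ s then s else s ++ [c]) PySem.Set.empty
  seen.map (fun c => (c, ((dataset.zip cities).filter (fun p => p.2 == c)).map (·.1)))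

-- ===== PRECONDITION & SPEC =====
def Spec_sort_dataset_by_city (dataset : List (List (String × String))) (out : List (String × List (List (String × String)))) : Prop := out = sort_dataset_by_city_alt dataset
instance (dataset : List (List (String × String))) (out : List (String × List (List (String × String)))) : Decidable (Spec_sort_dataset_by_city dataset out) := by unfold Spec_sort_dataset_by_city; infer_instance

-- ===== CLAIM (what is proved, stated in full; the proofs are below) =====
def Claim_equal_sort_dataset_by_city : Prop := ∀ (dataset : List (List (String × String))), Dom_sort_dataset_by_city dataset → Spec_sort_dataset_by_city dataset (sort_dataset_by_city dataset)

-- ===== LEMMAS AND PROOFS =====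

-- the city of an item, computed once
def pvCity (item : List (String × String)) : String :=
  extract_city ((PySem.Dict.mk item).getD "address" "")

-- A's loop body equals a bare 'modify': the create-empty-then-append dance is d[k] = d.get(k, []) ++ [item]
theorem pv_stepA (d : PySem.Dict String (List (List (String × String)))) (item : List (String × String)) :
    (if d.contains (pvCity item) then d else d.insert (pvCity item) []).modify (pvCity item) [] (fun l => l ++ [item])
      = d.modify (pvCity item) [] (fun l => l ++ [item]) := by
  by_cases h : d.contains (pvCity item)
  · simp [h]
  · rw [Bool.not_eq_true] at h
    rw [h]
    simp only [Bool.false_eq_true, if_false, PySem.Dict.modify, PySem.Dict.getD_insert_self,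
      PySem.Dict.insert_insert_self, PySem.Dict.getD_of_not_contains d [] h]

-- both ports equal the common normal form
theorem pv_A_norm (dataset : List (List (String × String))) :
    sort_dataset_by_city dataset
      = (PySem.Set.ofList (dataset.map pvCity)).map
          (fun c => (c, dataset.filter (fun it => pvCity it == c))) := by
  unfold sort_dataset_by_city
  have hstep : (fun (d : PySem.Dict String (List (List (String × String)))) item =>
      let address := (PySem.Dict.mk item).getD "address" ""
      let city := extract_city address
      let d1 := if d.contains city then d else d.insert city []
      d1.modify city [] (fun l => l ++ [item]))
      = (fun d item => d.modify (pvCity item) [] (fun l => l ++ [item])) := by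
    funext d item
    exact pv_stepA d item
  rw [hstep]
  set D := dataset.foldl (fun d item => d.modify (pvCity item) [] (fun l => l ++ [item])) PySem.Dict.empty with hD
  have hkeys : D.keys = PySem.Set.ofList (dataset.map pvCity) := by
    rw [hD, PySem.Dict.keys_foldl_modify_key dataset pvCity [] (fun _ x => fun l => l ++ [x]) PySem.Dict.empty]
    simp [PySem.Set.update_nil_left]
  have hnd : D.keys.Nodup := by rw [hkeys]; exact PySem.Set.nodup_ofList _
  have hget : ∀ c, D.getD c [] = dataset.filter (fun it => pvCity it == c) := by
    intro c
    have hm : D = (dataset.map (fun it => (pvCity it, it))).foldl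
        (fun d p => d.modify p.1 [] (fun l => l ++ [p.2])) PySem.Dict.empty := by
      rw [hD, List.foldl_map]
    rw [hm, PySem.Dict.getD_foldl_modify_append]
    simp [List.filter_map, Function.comp_def]
  rw [PySem.Dict.items_eq_map_keys D hnd [], hkeys]
  exact List.map_congr_left (fun c _ => by rw [hget c])

theorem pv_B_norm (dataset : List (List (String × String))) :
    sort_dataset_by_city_alt dataset
      = (PySem.Set.ofList (dataset.map pvCity)).map
          (fun c => (c, dataset.filter (fun it => pvCity it == c))) := by
  simp only [sort_dataset_by_city_alt]
  have hc : (fun item => extract_city ((PySem.Dict.mk item).getD "address" "")) = pvCity := rfl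
  rw [hc]
  have hseen : (dataset.map pvCity).foldl (fun s c => if c ∈ s then s else s ++ [c]) PySem.Set.empty
      = PySem.Set.ofList (dataset.map pvCity) := by
    have hadd : (fun (s : PySem.Set String) c => if c ∈ s then s else s ++ [c]) = PySem.Set.add := by
      funext s c
      rw [PySem.Set.add_eq_ite]
    rw [hadd, PySem.Set.ofList_eq_foldl]
    rfl
  rw [hseen, ← List.map_prod_left_eq_zip]
  refine List.map_congr_left (fun c _ => ?_)
  rw [List.filter_map]
  simp [Function.comp_def]

-- ===== VERDICT (by name: the statement is the Claim_ definition above) =====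
theorem sort_dataset_by_city_spec : Claim_equal_sort_dataset_by_city := by
  intro dataset _
  unfold Spec_sort_dataset_by_city
  rw [pv_A_norm, pv_B_norm]
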